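-- pv_equiv track=rewrite | github.com/deadlylover/umamusume-auto-train | core/trackblazer/models.py | _format_training_gain_parts
-- ===== SOURCE A (Python) =====
-- def _safe_int(value, default_value=0):
--   try:
--     return int(value)
--   except (TypeError, ValueError):
--     return default_value
--
-- def _visible_training_gains(gains):
--   visible = {}
--   for stat, value in (gains or {}).items():
--     if stat == "sp":
--       continue
--     amount = _safe_int(value)
--     if amount:
--       visible[stat] = amount
--   return visible
--
-- def _format_training_gain_parts(training_name, gains):
--   visible = _visible_training_gains(gains)
--   ordered = []
--   main_gain = visible.pop(training_name, 0)
--   if main_gain: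
--     ordered.append(f"{training_name}+{main_gain}")
--   for stat in sorted(visible):
--     ordered.append(f"{stat}+{visible[stat]}")
--   return ordered
-- ===== SOURCE B (Python) =====
-- def _format_training_gain_parts(training_name, gains):
--   visible = {stat: value for stat, value in (gains or {}).items()
--              if stat != "sp" and value}
--   return [f"{stat}+{visible[stat]}"
--           for stat in sorted(visible, key=lambda s: (s != training_name, s))]
-- ===== Notes on version B (the rewrite author's own statement) =====
-- stated objective: simpler
-- what changed: The two-phase assembly (dict pop of the main stat, conditional append, then a loop over the alphabetically sorted rest) is replaced by one comprehension over a single composite-key sort that forces the training stat first; the zero-filter guarantees a present training stat is nonzero, so no branch is needed.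
import Mathlib
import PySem

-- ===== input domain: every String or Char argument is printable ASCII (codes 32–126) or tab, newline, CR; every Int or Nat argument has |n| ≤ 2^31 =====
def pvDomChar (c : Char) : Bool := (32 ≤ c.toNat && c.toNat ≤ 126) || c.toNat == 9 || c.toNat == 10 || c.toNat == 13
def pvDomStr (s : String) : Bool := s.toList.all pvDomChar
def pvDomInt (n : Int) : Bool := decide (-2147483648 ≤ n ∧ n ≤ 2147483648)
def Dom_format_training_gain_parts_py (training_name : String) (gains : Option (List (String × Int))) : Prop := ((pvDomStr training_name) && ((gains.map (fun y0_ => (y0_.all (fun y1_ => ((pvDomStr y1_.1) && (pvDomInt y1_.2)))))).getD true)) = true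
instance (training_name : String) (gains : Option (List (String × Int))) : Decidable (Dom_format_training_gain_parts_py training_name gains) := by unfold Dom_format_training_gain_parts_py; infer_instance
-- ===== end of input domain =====

-- B replaces A's pop-the-main-stat-then-branch assembly by one comprehension over a single
-- composite-key sort that puts the training stat first (objective: simpler).

-- ===== PORT A =====
-- int(value) on an Int argument returns it unchanged and never raises (exact on Int inputs).
def pv_safe_int (value : Int) (_default_value : Int) : Int := value

-- the dict parameter is an association list; Python's dict has last-value-wins, first-position
-- key semantics, ported by building a PySem.Dict before iterating .items()
def pv_visible_training_gains (gains : Option (List (String × Int))) : PySem.Dict String Int :=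
  (PySem.Dict.ofList (gains.getD [])).items.foldl
    (fun visible p =>
      if p.1 = "sp" then visible
      else
        let amount := pv_safe_int p.2 0
        if amount ≠ 0 then visible.insert p.1 amount else visible)
    PySem.Dict.empty

def format_training_gain_parts_py (training_name : String) (gains : Option (List (String × Int))) : List String :=
  let visible := pv_visible_training_gains gains
  -- visible.pop(training_name, 0): read with default, then remove the key
  let main_gain := visible.getD training_name 0
  let visible := visible.erase training_name
  let ordered := if main_gain ≠ 0 then [training_name ++ "+" ++ PySem.Int.toStr main_gain] else []
  (PySem.List.sorted visible.keys (fun s => s)).foldl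
    (fun ordered stat => ordered ++ [stat ++ "+" ++ PySem.Int.toStr (visible.getD stat 0)])
    ordered

-- ===== PORT B =====
def format_training_gain_parts_py_alt (training_name : String) (gains : Option (List (String × Int))) : List String :=
  let visible := (PySem.Dict.ofList (gains.getD [])).items.foldl
    (fun visible p => if p.1 ≠ "sp" ∧ p.2 ≠ 0 then visible.insert p.1 p.2 else visible)
    PySem.Dict.empty
  (PySem.List.sorted2 visible.keys (fun s => decide (s ≠ training_name)) (fun s => s)).map
    (fun stat => stat ++ "+" ++ PySem.Int.toStr (visible.getD stat 0))

-- ===== PRECONDITION & SPEC =====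
def Spec_format_training_gain_parts_py (training_name : String) (gains : Option (List (String × Int))) (out : List String) : Prop := out = format_training_gain_parts_py_alt training_name gains
instance (training_name : String) (gains : Option (List (String × Int))) (out : List String) : Decidable (Spec_format_training_gain_parts_py training_name gains out) := by unfold Spec_format_training_gain_parts_py; infer_instance

-- ===== CLAIM (what is proved, stated in full; the proofs are below) =====
def Claim_equal_format_training_gain_parts_py : Prop := ∀ (training_name : String) (gains : Option (List (String × Int))), Dom_format_training_gain_parts_py training_name gains → Spec_format_training_gain_parts_py training_name gains (format_training_gain_parts_py training_name gains)

-- ===== LEMMAS AND PROOFS =====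

-- A's and B's filtering loops build the same dict: the step functions are pointwise equal.
theorem pv_vis_eq (gains : Option (List (String × Int))) :
    pv_visible_training_gains gains =
    (PySem.Dict.ofList (gains.getD [])).items.foldl
      (fun visible p => if p.1 ≠ "sp" ∧ p.2 ≠ 0 then visible.insert p.1 p.2 else visible)
      PySem.Dict.empty := by
  unfold pv_visible_training_gains
  congr 1
  funext visible p
  by_cases h1 : p.1 = "sp" <;> by_cases h2 : p.2 = 0 <;>
    simp [pv_safe_int, h1, h2]

-- the filtering loop keeps keys Nodup
theorem pv_vis_nodup (L : List (String × Int)) (d : PySem.Dict String Int)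
    (h : d.keys.Nodup) :
    (L.foldl (fun visible p => if p.1 ≠ "sp" ∧ p.2 ≠ 0 then visible.insert p.1 p.2 else visible)
      d).keys.Nodup := by
  induction L generalizing d with
  | nil => exact h
  | cons p L ih =>
    simp only [List.foldl_cons]
    split
    · exact ih _ (PySem.Dict.nodup_keys_insert d p.1 p.2 h)
    · exact ih _ h

-- every stored value is nonzero
theorem pv_vis_nonzero (L : List (String × Int)) (d : PySem.Dict String Int)
    (h : ∀ s v, d.get? s = some v → v ≠ 0) :
    ∀ s v, ((L.foldl (fun visible p => if p.1 ≠ "sp" ∧ p.2 ≠ 0 then visible.insert p.1 p.2 else visible)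
      d).get? s = some v) → v ≠ 0 := by
  induction L generalizing d with
  | nil => exact h
  | cons p L ih =>
    simp only [List.foldl_cons]
    split
    · rename_i hp
      refine ih _ ?_
      intro s v hv
      rw [PySem.Dict.get?_insert] at hv
      split at hv
      · cases hv; exact hp.2
      · exact h s v hv
    · exact ih _ h

theorem pv_get?_mk_filter (items : List (String × Int)) (s t : String) (hst : s ≠ t) :
    (PySem.Dict.mk (items.filter (fun p => !(p.1 == t)))).get? s = (PySem.Dict.mk items).get? s := by
  induction items with
  | nil => simp
  | cons p items ih =>
    by_cases hp : p.1 = t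
    · rw [show List.filter (fun p => !(p.1 == t)) (p :: items) = items.filter (fun p => !(p.1 == t)) by
        simp [hp]]
      rw [ih]
      cases p with
      | mk k v =>
        simp only at hp
        rw [PySem.Dict.get?_mk_cons]
        simp [hp, (by simpa [hp] using hst.symm : t ≠ s)]
    · rw [show List.filter (fun p => !(p.1 == t)) (p :: items) =
          p :: items.filter (fun p => !(p.1 == t)) by simp [hp]]
      cases p with
      | mk k v =>
        rw [PySem.Dict.get?_mk_cons, PySem.Dict.get?_mk_cons, ih]

-- lookups other than the erased key are unchanged
theorem pv_get?_erase (d : PySem.Dict String Int) (s t : String) (hst : s ≠ t) :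
    (d.erase t).get? s = d.get? s := by
  cases d with
  | mk items => exact pv_get?_mk_filter items s t hst

-- keys of the erased dict = filtered keys
theorem pv_keys_erase (d : PySem.Dict String Int) (t : String) :
    (d.erase t).keys = d.keys.filter (fun s => s ≠ t) := by
  cases d with
  | mk items =>
    show (items.filter (fun p => !(p.1 == t))).map Prod.fst = (items.map Prod.fst).filter _
    rw [List.filter_map]
    exact congrArg (List.map Prod.fst) (List.filter_congr (fun p _ => by simp [Bool.beq_eq_decide_eq]))

-- ---- characterisation of B's composite-key sort ----

theorem pv_insertBy_head (bf : String → String → Bool) (x : String) (S : List String)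
    (h : ∀ y ∈ S, bf x y = true) :
    PySem.List.insertBy bf x S = x :: S := by
  cases S with
  | nil => rfl
  | cons y S => simp [PySem.List.insertBy, h y (by simp)]

theorem pv_insertBy_skip (bf : String → String → Bool) (x y : String) (S : List String)
    (h : bf x y = false) :
    PySem.List.insertBy bf x (y :: S) = y :: PySem.List.insertBy bf x S := by
  simp [PySem.List.insertBy, h]

theorem pv_insertBy_congr (bf bf' : String → String → Bool) (x : String) (S : List String)
    (h : ∀ y ∈ S, bf x y = bf' x y) :
    PySem.List.insertBy bf x S = PySem.List.insertBy bf' x S := by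
  induction S with
  | nil => rfl
  | cons y S ih =>
    have hy := h y (by simp)
    simp only [PySem.List.insertBy, hy]
    split
    · rfl
    · rw [show PySem.List.insertBy bf x S = PySem.List.insertBy bf' x S from
        ih (fun z hz => h z (by simp [hz]))]

-- sorted with the composite key (s ≠ t, s) = t first (if present) then the rest alphabetically
theorem pv_sorted2_ne_key (t : String) (L : List String) (hnd : L.Nodup) :
    PySem.List.sorted2 L (fun s => decide (s ≠ t)) (fun s => s) =
      (if t ∈ L then [t] else []) ++
        PySem.List.sorted (L.filter (fun s => s ≠ t)) (fun s => s) := by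
  induction L using List.reverseRecOn with
  | nil => simp [PySem.List.sorted2, PySem.List.sorted]
  | append_singleton L x ih =>
    have hndL : L.Nodup := (List.nodup_append.mp hnd).1
    have step2 : PySem.List.sorted2 (L ++ [x]) (fun s => decide (s ≠ t)) (fun s => s) =
        PySem.List.insertBy
          (fun a b => decide ((decide (a ≠ t) : Bool) < (decide (b ≠ t) : Bool)) ||
            (!decide ((decide (b ≠ t) : Bool) < (decide (a ≠ t) : Bool)) && decide (a < b)))
          x (PySem.List.sorted2 L (fun s => decide (s ≠ t)) (fun s => s)) := by
      simp [PySem.List.sorted2, List.foldl_append]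
    have step1 : ∀ (M : List String) (y : String),
        PySem.List.sorted (M ++ [y]) (fun s => s) =
        PySem.List.insertBy (fun a b => decide (a < b)) y (PySem.List.sorted M (fun s => s)) := by
      intro M y
      rw [PySem.List.sorted_eq_foldl_insertBy, PySem.List.sorted_eq_foldl_insertBy,
        List.foldl_append]
      rfl
    rw [step2, ih hndL]
    by_cases hx : x = t
    · subst hx
      have hxL : x ∉ L :=
        (List.nodup_cons.mp (by simpa using List.nodup_append_comm.mp hnd)).1
      rw [if_neg hxL, List.nil_append,
        pv_insertBy_head _ _ _ (by
          intro y hy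
          have hy' : y ≠ x := by
            have := (PySem.List.mem_sorted _ _ _ y).mp hy
            simpa using (List.mem_filter.mp this).2
          simp [hy'])]
      have : (L ++ [x]).filter (fun s => s ≠ x) = L.filter (fun s => s ≠ x) := by
        simp [List.filter_append]
      rw [this, if_pos (by simp)]
      rfl
    · have hbfxt : ∀ (z : String), z = t →
          (decide ((decide (x ≠ t) : Bool) < (decide (z ≠ t) : Bool)) ||
            (!decide ((decide (z ≠ t) : Bool) < (decide (x ≠ t) : Bool)) && decide (x < z))) = false := by
        intro z hz; subst hz; simp [hx]
      have hcongr : ∀ S : List String, (∀ y ∈ S, y ≠ t) →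
          PySem.List.insertBy
            (fun a b => decide ((decide (a ≠ t) : Bool) < (decide (b ≠ t) : Bool)) ||
              (!decide ((decide (b ≠ t) : Bool) < (decide (a ≠ t) : Bool)) && decide (a < b)))
            x S = PySem.List.insertBy (fun a b => decide (a < b)) x S := by
        intro S hS
        refine pv_insertBy_congr _ _ _ _ ?_
        intro y hy
        simp [hx, hS y hy]
      have hmemS : ∀ y ∈ PySem.List.sorted (L.filter (fun s => s ≠ t)) (fun s => s), y ≠ t := by
        intro y hy
        have := (PySem.List.mem_sorted _ _ _ y).mp hy
        simpa using (List.mem_filter.mp this).2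
      have hfilt : (L ++ [x]).filter (fun s => s ≠ t) = L.filter (fun s => s ≠ t) ++ [x] := by
        simp [List.filter_append, hx]
      by_cases ht : t ∈ L
      · rw [if_pos ht, if_pos (by simp [ht])]
        simp only [List.cons_append, List.nil_append]
        rw [pv_insertBy_skip _ _ _ _ (hbfxt t rfl), hcongr _ hmemS, ← step1, hfilt]
      · rw [if_neg ht, if_neg (by simp [ht, Ne.symm hx]), List.nil_append, List.nil_append,
          hcongr _ hmemS, ← step1, hfilt]

-- ===== VERDICT (by name: the statement is the Claim_ definition above) =====
theorem format_training_gain_parts_py_spec : Claim_equal_format_training_gain_parts_py := by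
  intro training_name gains _
  show _ = _
  unfold format_training_gain_parts_py format_training_gain_parts_py_alt
  rw [← pv_vis_eq]
  set vis := pv_visible_training_gains gains with hvis
  have hnd : vis.keys.Nodup := by
    rw [hvis, pv_vis_eq]; exact pv_vis_nodup _ _ PySem.Dict.nodup_keys_empty
  have hnz : ∀ s v, vis.get? s = some v → v ≠ 0 := by
    rw [hvis, pv_vis_eq]
    exact pv_vis_nonzero _ _ (by simp)
  simp only [PySem.List.foldl_append_singleton_eq_map]
  rw [pv_keys_erase, pv_sorted2_ne_key training_name vis.keys hnd, List.map_append]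
  have hmap :
      (PySem.List.sorted (vis.keys.filter (fun s => s ≠ training_name)) (fun s => s)).map
        (fun stat => stat ++ "+" ++ PySem.Int.toStr ((vis.erase training_name).getD stat 0)) =
      (PySem.List.sorted (vis.keys.filter (fun s => s ≠ training_name)) (fun s => s)).map
        (fun stat => stat ++ "+" ++ PySem.Int.toStr (vis.getD stat 0)) := by
    refine List.map_congr_left ?_
    intro s hs
    have hsne : s ≠ training_name := by
      have := (PySem.List.mem_sorted _ _ _ s).mp hs
      simpa using (List.mem_filter.mp this).2
    rw [PySem.Dict.getD_eq_get?_getD, PySem.Dict.getD_eq_get?_getD,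
      pv_get?_erase vis s training_name hsne]
  rw [hmap]
  congr 1
  by_cases ht : training_name ∈ vis.keys
  · rw [if_pos ht]
    obtain ⟨v, hv⟩ : ∃ v, vis.get? training_name = some v := by
      cases h : vis.get? training_name with
      | none => exact absurd ((PySem.Dict.get?_eq_none_iff_not_mem_keys vis training_name).mp h) (by simpa using ht)
      | some v => exact ⟨v, rfl⟩
    have hgd : vis.getD training_name 0 = v := by
      rw [PySem.Dict.getD_eq_get?_getD, hv]; rfl
    rw [if_pos (by rw [hgd]; exact hnz _ _ hv)]
    simp
  · rw [if_neg ht]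
    have hgd : vis.getD training_name 0 = 0 := by
      rw [PySem.Dict.getD_eq_get?_getD,
        (PySem.Dict.get?_eq_none_iff_not_mem_keys vis training_name).mpr ht]
      rfl
    rw [if_neg (by rw [hgd]; simp)]
    rfl
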